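-- pv_equiv track=rewrite | github.com/liuguangxi/acmsguru | Codes/sgu221.py | calc
-- ===== SOURCE A (Python) =====
-- def calc(v, k):
--     if k == 0:
--         return 1
--     n = len(v)
--     f = [[0 for i in range(k + 1)] for j in range(n)]
--     f[n - 1][1] = v[n - 1] - k + 1
--     for i in range(n - 2, -1, -1):
--         f[i][1] = v[i] - k + 1 + f[i + 1][1]
--     for m in range(2, k + 1):
--         for i in range(n - m, -1, -1):
--             f[i][m] = (v[i] - k + m) * f[i + 1][m - 1] + f[i + 1][m]
--     return f[0][k]
-- ===== SOURCE B (Python) =====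
-- def calc(v, k):
--     # Forward prefix scan: dp[j] = sum over j indices chosen so far (in order) of
--     # the product of rank-based weights (value - rank + 1); weights do not involve k.
--     # Ranks above the number of items seen so far are always zero, so the inner
--     # update only needs to go up to min(k, i + 1).
--     dp = [1] + [0] * k
--     for i, x in enumerate(v):
--         for j in range(min(k, i + 1), 0, -1):
--             dp[j] += (x - j + 1) * dp[j - 1]
--     return dp[k]
-- ===== Notes on version B (the rewrite author's own statement) =====
-- stated objective: alternative
-- what changed: Replaces A's backward suffix DP filling an n x (k+1) 2D table with k-dependent remaining-count weights (v[i]-k+m) and a separate m=1 base pass by a single forward left-to-right scan maintaining one O(k) row of rank-weighted selection sums with k-free weights (x-j+1), the inner update bounded by min(k, i+1); the different recurrence is proved equal via the bilinear invariant sum_j dp[j]*f[suffix][k-j].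
import Mathlib
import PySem

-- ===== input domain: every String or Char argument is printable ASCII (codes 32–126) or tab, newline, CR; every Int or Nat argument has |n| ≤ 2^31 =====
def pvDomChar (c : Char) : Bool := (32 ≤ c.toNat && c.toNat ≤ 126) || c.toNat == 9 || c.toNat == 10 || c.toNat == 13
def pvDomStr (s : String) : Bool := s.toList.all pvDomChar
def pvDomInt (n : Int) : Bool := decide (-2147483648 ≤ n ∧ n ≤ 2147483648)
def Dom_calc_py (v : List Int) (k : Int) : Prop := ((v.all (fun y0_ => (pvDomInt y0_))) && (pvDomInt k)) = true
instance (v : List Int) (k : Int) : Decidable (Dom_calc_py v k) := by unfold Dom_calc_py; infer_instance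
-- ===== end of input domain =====

-- B replaces A's backward suffix DP over an n×(k+1) 2D table (k-dependent weights v[i]-k+m,
-- separate m=1 base pass) by a forward left-to-right scan of one O(k) row of rank-weighted
-- selection sums with k-free weights (x-j+1); equality of return values on Pre_ is proved.

-- ===== PORT A =====
-- f[i][m] read/write helpers for the 2D list; indices used are nonnegative and in range under Pre_ (exact there)
def pvGet2 (f : List (List Int)) (i m : Int) : Int :=
  PySem.List.pyGetD (PySem.List.pyGetD f i []) m 0
def pvSet2 (f : List (List Int)) (i m : Int) (a : Int) : List (List Int) :=
  PySem.List.pySetD f i (PySem.List.pySetD (PySem.List.pyGetD f i []) m a)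

def calc_py (v : List Int) (k : Int) : Int :=
  if k = 0 then 1 else
    pvGet2
      ((PySem.List.pyRange 2 (k+1) 1).foldl (fun f m =>
        (PySem.List.pyRange ((v.length : Int) - m) (-1) (-1)).foldl
          (fun f i => pvSet2 f i m
            ((PySem.List.pyGetD v i 0 - k + m) * pvGet2 f (i+1) (m-1) + pvGet2 f (i+1) m)) f)
        ((PySem.List.pyRange ((v.length : Int) - 2) (-1) (-1)).foldl
          (fun f i => pvSet2 f i 1 (PySem.List.pyGetD v i 0 - k + 1 + pvGet2 f (i+1) 1))
          (pvSet2
            ((PySem.List.pyRange 0 (v.length : Int) 1).map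
              (fun _ => (PySem.List.pyRange 0 (k+1) 1).map (fun _ => (0:Int))))
            ((v.length : Int) - 1) 1 (PySem.List.pyGetD v ((v.length : Int) - 1) 0 - k + 1))))
      0 k

-- ===== PORT B =====
def calc_py_alt (v : List Int) (k : Int) : Int :=
  PySem.List.pyGetD
    ((PySem.List.enumerate v 0).foldl (fun dp ix =>
        (PySem.List.pyRange (min k (ix.1 + 1)) 0 (-1)).foldl
          (fun dp j => PySem.List.pySetD dp j
            (PySem.List.pyGetD dp j 0 + (ix.2 - j + 1) * PySem.List.pyGetD dp (j-1) 0)) dp)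
      ((1 : Int) :: List.replicate k.toNat 0))      -- [1] + [0]*k
    k 0

-- ===== PRECONDITION & SPEC =====
-- Pre_ excludes exactly the inputs where the Python A raises IndexError: k < 0 (empty DP rows),
-- and k ≥ 1 with empty v (f[n-1] on an empty table). A returns on every input Pre_ admits.
def Pre_calc_py (v : List Int) (k : Int) : Prop := k = 0 ∨ (1 ≤ k ∧ v ≠ [])
instance (v : List Int) (k : Int) : Decidable (Pre_calc_py v k) := by unfold Pre_calc_py; infer_instance
def pvWitness_calc_py : List Int × Int := ([2, 3, 4], 2)

def Spec_calc_py (v : List Int) (k : Int) (out : Int) : Prop := out = calc_py_alt v k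
instance (v : List Int) (k : Int) (out : Int) : Decidable (Spec_calc_py v k out) := by unfold Spec_calc_py; infer_instance

-- ===== CLAIM (what is proved, stated in full; the proofs are below) =====
def Claim_equal_calc_py : Prop := ∀ (v : List Int) (k : Int), Dom_calc_py v k → Pre_calc_py v k → Spec_calc_py v k (calc_py v k)

-- ===== LEMMAS AND PROOFS =====

-- A's mathematical DP: gDP k xs m = weighted count for placing m items on the suffix xs
def gDP (k : Int) : List Int → Nat → Int
  | _, 0 => 1
  | [], _ + 1 => 0
  | x :: xs, m + 1 => (x - k + ((m : Int) + 1)) * gDP k xs m + gDP k xs (m + 1)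

theorem gDP_zero (k : Int) (xs : List Int) : gDP k xs 0 = 1 := by cases xs <;> rfl

theorem gDP_eq_zero (k : Int) : ∀ (xs : List Int) (m : Nat), xs.length < m → gDP k xs m = 0 := by
  intro xs
  induction xs with
  | nil => intro m hm; cases m with
    | zero => omega
    | succ m => simp [gDP]
  | cons x xs ih =>
    intro m hm
    cases m with
    | zero => omega
    | succ m =>
      simp only [List.length_cons] at hm
      cases m with
      | zero => omega
      | succ m' =>
        simp only [gDP]
        rw [ih (m' + 1) (by omega), ih (m' + 1 + 1) (by omega)]
        ring

-- descending loop 'for i in range(j, -1, -1)' with invariant P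
theorem foldl_countdown {σ : Type} (step : σ → Int → σ) (P : Int → σ) :
    ∀ (j : Int), -1 ≤ j → (∀ i, 0 ≤ i → i ≤ j → step (P (i+1)) i = P i) →
    (PySem.List.pyRange j (-1) (-1)).foldl step (P (j+1)) = P 0 := by
  intro j
  induction h : (j + 1).toNat generalizing j with
  | zero =>
    intro hj _
    have : j = -1 := by omega
    subst this
    rw [PySem.List.pyRange_neg_one_eq_nil (by omega)]
    norm_num
  | succ t ih =>
    intro hj hstep
    have hj0 : 0 ≤ j := by omega
    rw [PySem.List.pyRange_neg_one_cons (by omega)]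
    simp only [List.foldl_cons]
    rw [hstep j hj0 le_rfl]
    have := ih (j - 1) (by omega) (by omega) (fun i h1 h2 => hstep i h1 (by omega))
    simpa using this

-- descending loop 'for j in range(a, 0, -1)' with invariant Q
theorem foldl_countdown0 {σ : Type} (step : σ → Int → σ) (Q : Int → σ) :
    ∀ (a : Int), 0 ≤ a → (∀ i, 1 ≤ i → i ≤ a → step (Q i) i = Q (i-1)) →
    (PySem.List.pyRange a 0 (-1)).foldl step (Q a) = Q 0 := by
  intro a
  induction h : a.toNat generalizing a with
  | zero =>
    intro ha _
    have : a = 0 := by omega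
    subst this
    rw [PySem.List.pyRange_neg_one_eq_nil le_rfl]
    rfl
  | succ t ih =>
    intro ha hstep
    rw [PySem.List.pyRange_neg_one_cons (by omega)]
    simp only [List.foldl_cons]
    rw [hstep a (by omega) le_rfl]
    exact ih (a - 1) (by omega) (by omega) (fun i h1 h2 => hstep i h1 (by omega))

-- ascending loop 'for m in range(a, b)' with invariant Q
theorem foldl_countup {σ : Type} (step : σ → Int → σ) (Q : Int → σ) :
    ∀ (a b : Int), a ≤ b → (∀ m, a ≤ m → m < b → step (Q (m-1)) m = Q m) →
    (PySem.List.pyRange a b 1).foldl step (Q (a-1)) = Q (b-1) := by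
  intro a b
  induction h : (b - a).toNat generalizing a with
  | zero =>
    intro hab _
    have : a = b := by omega
    subst this
    rw [PySem.List.pyRange_one_eq_nil le_rfl]
    rfl
  | succ t ih =>
    intro hab hstep
    have hlt : a < b := by omega
    rw [PySem.List.pyRange_one_cons hlt]
    simp only [List.foldl_cons]
    rw [hstep a le_rfl hlt]
    have := ih (a + 1) (by omega) (by omega) (fun m h1 h2 => hstep m (by omega) h2)
    simpa using this

-- ========================= A-side: table invariant =========================

-- A's table state: columns < m are final, column m is final for rows ≥ t, everything else 0
def cellv (k : Int) (v : List Int) (m t : Int) (i c : Nat) : Int :=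
  if 1 ≤ c ∧ ((c : Int) < m ∨ ((c : Int) = m ∧ t ≤ (i : Int))) then gDP k (v.drop i) c else 0

def ptbl (k : Int) (v : List Int) (m t : Int) : List (List Int) :=
  (List.range v.length).map (fun i => (List.range (k.toNat + 1)).map (fun c => cellv k v m t i c))

theorem get_ptbl (k : Int) (v : List Int) (m t : Int) (i c : Int)
    (hi : 0 ≤ i) (hi2 : i < v.length) (hc : 0 ≤ c) (hc2 : c ≤ k) :
    pvGet2 (ptbl k v m t) i c = cellv k v m t i.toNat c.toNat := by
  obtain ⟨i', rfl⟩ : ∃ i' : Nat, i = (i' : Int) := ⟨i.toNat, by omega⟩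
  obtain ⟨c', rfl⟩ : ∃ c' : Nat, c = (c' : Int) := ⟨c.toNat, by omega⟩
  have hi' : i' < v.length := by exact_mod_cast hi2
  have hc' : c' < k.toNat + 1 := by omega
  unfold pvGet2 ptbl
  rw [PySem.List.pyGetD_natCast, PySem.List.pyGetD_natCast]
  simp [List.getD, hi', hc']

theorem set_ptbl (k : Int) (v : List Int) (m : Int) (i : Int)
    (hi : 0 ≤ i) (hi2 : i < v.length) (hm1 : 1 ≤ m) (hmk : m ≤ k)
    (X : Int) (hX : X = gDP k (v.drop i.toNat) m.toNat) :
    pvSet2 (ptbl k v m (i+1)) i m X = ptbl k v m i := by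
  obtain ⟨i', rfl⟩ : ∃ i' : Nat, i = (i' : Int) := ⟨i.toNat, by omega⟩
  have hi' : i' < v.length := by exact_mod_cast hi2
  obtain ⟨m', rfl⟩ : ∃ m' : Nat, m = (m' : Int) := ⟨m.toNat, by omega⟩
  have hm' : m' < k.toNat + 1 := by omega
  unfold pvSet2 ptbl
  rw [PySem.List.pyGetD_natCast, PySem.List.pySetD_natCast, PySem.List.pySetD_natCast]
  rw [List.getD_eq_getElem _ _ (by simpa using hi')]
  apply List.ext_getElem
  · simp
  intro j hj1 hj2
  simp only [List.length_set, List.length_map, List.length_range] at hj1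
  rw [List.getElem_set]
  by_cases hji : i' = j
  · subst hji
    rw [if_pos rfl]
    simp only [List.getElem_map, List.getElem_range]
    apply List.ext_getElem
    · simp
    intro c hc1 hc2
    simp only [List.length_set, List.length_map, List.length_range] at hc1
    rw [List.getElem_set]
    by_cases hcm : m' = c
    · subst hcm
      rw [if_pos rfl, hX]
      simp only [List.getElem_map, List.getElem_range]
      unfold cellv
      rw [if_pos ⟨by omega, Or.inr ⟨rfl, by omega⟩⟩]
      simp
    · rw [if_neg hcm]
      simp only [List.getElem_map, List.getElem_range]
      unfold cellv
      have : ((c : Int) < (m' : Int) ∨ ((c : Int) = (m' : Int) ∧ (i' : Int) + 1 ≤ (i' : Int)))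
           ↔ ((c : Int) < (m' : Int) ∨ ((c : Int) = (m' : Int) ∧ (i' : Int) ≤ (i' : Int))) := by
        constructor <;> intro h <;> rcases h with h | ⟨h1, h2⟩
        · exact Or.inl h
        · omega
        · exact Or.inl h
        · exact absurd (show c = m' from by exact_mod_cast h1) (fun hh => hcm hh.symm)
      simp only [this]
  · rw [if_neg hji]
    simp only [List.getElem_map, List.getElem_range]
    apply List.map_congr_left
    intro c _
    unfold cellv
    have : ((i' : Int) + 1 ≤ (j : Int)) ↔ ((i' : Int) ≤ (j : Int)) := by
      constructor <;> intro h
      · omega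
      · have : i' ≠ j := hji
        omega
    simp only [this]

theorem gDP_cons (k x : Int) (xs : List Int) (m : Nat) (hm : 1 ≤ m) :
    gDP k (x :: xs) m = (x - k + (m : Int)) * gDP k xs (m - 1) + gDP k xs m := by
  cases m with
  | zero => omega
  | succ m' => simp only [gDP, Nat.add_sub_cancel]; push_cast; ring

theorem zeros_eq (k : Int) (v : List Int) (hk : 1 ≤ k) :
    (PySem.List.pyRange 0 (v.length : Int) 1).map
      (fun _ => (PySem.List.pyRange 0 (k+1) 1).map (fun _ => (0:Int)))
    = ptbl k v 1 (v.length : Int) := by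
  rw [PySem.List.pyRange_one, PySem.List.pyRange_one]
  rw [show ((v.length : Int) - 0).toNat = v.length by omega,
      show ((k + 1 : Int) - 0).toNat = k.toNat + 1 by omega]
  unfold ptbl
  simp only [List.map_map]
  apply List.map_congr_left
  intro i hi
  simp only [List.mem_range] at hi
  simp only [Function.comp]
  apply List.map_congr_left
  intro c _
  unfold cellv
  rw [if_neg (by omega)]
  simp

theorem ptbl_shift (k : Int) (v : List Int) (m t t' : Int) (ht : t ≤ 0) (ht' : t' ≤ 0) :
    ptbl k v m t = ptbl k v m t' := by
  unfold ptbl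
  apply List.map_congr_left
  intro i _
  apply List.map_congr_left
  intro c _
  unfold cellv
  have h1 : t ≤ (i : Int) := by omega
  have h2 : t' ≤ (i : Int) := by omega
  simp [h1, h2]

theorem bridge (k : Int) (v : List Int) (m : Int) (hm : 1 ≤ m) :
    ptbl k v m 0 = ptbl k v (m+1) ((v.length : Int) - m) := by
  unfold ptbl
  apply List.map_congr_left
  intro i hi
  simp only [List.mem_range] at hi
  apply List.map_congr_left
  intro c _
  unfold cellv
  have hiv : (i : Int) < (v.length : Int) := by exact_mod_cast hi
  by_cases hcm : 1 ≤ c ∧ (c : Int) ≤ m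
  · rw [if_pos (by omega), if_pos (by omega)]
  · by_cases hc2 : (c : Int) = m + 1 ∧ (v.length : Int) - m ≤ (i : Int)
    · rw [if_neg (by omega), if_pos (by omega)]
      refine (gDP_eq_zero k _ c ?_).symm
      rw [List.length_drop]
      omega
    · rw [if_neg (by omega), if_neg (by omega)]

theorem gDP_drop_step (k : Int) (v : List Int) (i m : Nat) (hi : i < v.length) (hm : 1 ≤ m) :
    gDP k (v.drop i) m
      = (v[i] - k + (m : Int)) * gDP k (v.drop (i+1)) (m-1) + gDP k (v.drop (i+1)) m := by
  rw [List.drop_eq_getElem_cons hi, gDP_cons k _ _ m hm]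

theorem gDP_last (k : Int) (v : List Int) (hn : 0 < v.length) :
    gDP k (v.drop (v.length - 1)) 1 = v[v.length - 1]'(by omega) - k + 1 := by
  rw [gDP_drop_step k v (v.length - 1) 1 (by omega) le_rfl]
  rw [show v.length - 1 + 1 = v.length by omega, List.drop_length]
  simp [gDP]

theorem a_eq (v : List Int) (k : Int) (hk : 1 ≤ k) (hv : v ≠ []) :
    calc_py v k = gDP k v k.toNat := by
  have hn : 0 < v.length := List.length_pos_of_ne_nil hv
  have hn' : (1 : Int) ≤ (v.length : Int) := by exact_mod_cast hn
  unfold calc_py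
  rw [if_neg (by omega), zeros_eq k v hk]
  -- initial assignment f[n-1][1] = v[n-1] - k + 1
  have hinit : pvSet2 (ptbl k v 1 (v.length : Int)) ((v.length : Int) - 1) 1
      (PySem.List.pyGetD v ((v.length : Int) - 1) 0 - k + 1) = ptbl k v 1 ((v.length : Int) - 1) := by
    have hX : PySem.List.pyGetD v ((v.length : Int) - 1) 0 - k + 1
        = gDP k (v.drop ((v.length : Int) - 1).toNat) ((1:Int)).toNat := by
      rw [PySem.List.pyGetD_eq_getElem v 0 (by omega) (by omega)]
      simp only [show ((v.length : Int) - 1).toNat = v.length - 1 by omega,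
          show ((1:Int)).toNat = 1 from rfl, gDP_last k v hn]
    have h := set_ptbl k v 1 ((v.length : Int) - 1) (by omega) (by omega) le_rfl hk _ hX
    rw [show (v.length : Int) - 1 + 1 = (v.length : Int) by ring] at h
    exact h
  rw [hinit]
  -- first loop: column 1, rows n-2 .. 0
  have hstep1 : ∀ i : Int, 0 ≤ i → i ≤ (v.length : Int) - 2 →
      (fun f i => pvSet2 f i 1 (PySem.List.pyGetD v i 0 - k + 1 + pvGet2 f (i+1) 1))
        ((fun t => ptbl k v 1 t) (i+1)) i = (fun t => ptbl k v 1 t) i := by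
    intro i h0 h2
    simp only []
    rw [get_ptbl k v 1 (i+1) (i+1) 1 (by omega) (by omega) (by omega) hk]
    unfold cellv
    rw [if_pos (by omega)]
    apply set_ptbl k v 1 i h0 (by omega) le_rfl hk
    rw [show ((1:Int)).toNat = 1 from rfl, gDP_drop_step k v i.toNat 1 (by omega) le_rfl]
    rw [PySem.List.pyGetD_eq_getElem v 0 (by omega) (by omega),
        show (i+1).toNat = i.toNat + 1 by omega]
    simp [gDP]
  have hloop1 := foldl_countdown
    (fun f i => pvSet2 f i 1 (PySem.List.pyGetD v i 0 - k + 1 + pvGet2 f (i+1) 1))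
    (fun t => ptbl k v 1 t) ((v.length : Int) - 2) (by omega) hstep1
  rw [show (v.length : Int) - 2 + 1 = (v.length : Int) - 1 by ring] at hloop1
  rw [hloop1]
  -- outer loop over columns m = 2 .. k
  have hstepm : ∀ m : Int, 2 ≤ m → m < k + 1 →
      (fun f m => (PySem.List.pyRange ((v.length : Int) - m) (-1) (-1)).foldl
        (fun f i => pvSet2 f i m
          ((PySem.List.pyGetD v i 0 - k + m) * pvGet2 f (i+1) (m-1) + pvGet2 f (i+1) m)) f)
        ((fun m => ptbl k v m 0) (m-1)) m = (fun m => ptbl k v m 0) m := by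
    intro m hm2 hmk
    simp only []
    rw [bridge k v (m-1) (by omega), show (m-1+1 : Int) = m by ring,
        show (v.length : Int) - (m-1) = (v.length : Int) - m + 1 by ring]
    have hstepin : ∀ i : Int, 0 ≤ i → i ≤ (v.length : Int) - m →
        (fun f i => pvSet2 f i m
          ((PySem.List.pyGetD v i 0 - k + m) * pvGet2 f (i+1) (m-1) + pvGet2 f (i+1) m))
          ((fun t => ptbl k v m t) (i+1)) i = (fun t => ptbl k v m t) i := by
      intro i h0 h2
      simp only []
      rw [get_ptbl k v m (i+1) (i+1) (m-1) (by omega) (by omega) (by omega) (by omega),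
          get_ptbl k v m (i+1) (i+1) m (by omega) (by omega) (by omega) (by omega)]
      unfold cellv
      rw [if_pos (by omega), if_pos (by omega)]
      apply set_ptbl k v m i h0 (by omega) (by omega) (by omega)
      rw [gDP_drop_step k v i.toNat m.toNat (by omega) (by omega)]
      rw [PySem.List.pyGetD_eq_getElem v 0 (by omega) (by omega),
          show (i+1).toNat = i.toNat + 1 by omega,
          show (m-1).toNat = m.toNat - 1 by omega,
          show ((m.toNat : Nat) : Int) = m by omega]
    by_cases hnm : -1 ≤ (v.length : Int) - m
    · exact foldl_countdown _ (fun t => ptbl k v m t) ((v.length : Int) - m) hnm hstepin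
    · rw [PySem.List.pyRange_neg_one_eq_nil (by omega)]
      simp only [List.foldl_nil]
      exact ptbl_shift k v m _ 0 (by omega) le_rfl
  have houter := foldl_countup
    (fun f m => (PySem.List.pyRange ((v.length : Int) - m) (-1) (-1)).foldl
      (fun f i => pvSet2 f i m
        ((PySem.List.pyGetD v i 0 - k + m) * pvGet2 f (i+1) (m-1) + pvGet2 f (i+1) m)) f)
    (fun m => ptbl k v m 0) 2 (k+1) (by omega) hstepm
  rw [show (2 - 1 : Int) = 1 by ring, show (k + 1 - 1 : Int) = k by ring] at houter
  rw [houter]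
  rw [get_ptbl k v k 0 0 k le_rfl (by omega) (by omega) le_rfl]
  unfold cellv
  rw [if_pos (by omega)]
  simp

-- ========================= B-side: rolling-row invariant =========================

-- the inner in-place descending update of B, as a function of the old row
def mixRow (x : Int) (r : List Int) (t : Int) : List Int :=
  (List.range r.length).map (fun (j : Nat) =>
    if t < (j : Int) then r.getD j 0 + (x - (j : Int) + 1) * r.getD (j-1) 0 else r.getD j 0)

theorem length_mixRow (x : Int) (r : List Int) (t : Int) : (mixRow x r t).length = r.length := by
  simp [mixRow]

-- mixRow changes nothing above t when every source entry r[j-1] with j > t is 0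
theorem mixRow_eq_self (x : Int) (r : List Int) (t : Int)
    (hz : ∀ j : Nat, t < (j : Int) → j < r.length → r.getD (j-1) 0 = 0) :
    mixRow x r t = r := by
  apply List.ext_getElem
  · simp [mixRow]
  intro j h1 h2
  simp only [mixRow, List.length_map, List.length_range] at h1
  simp only [mixRow, List.getElem_map, List.getElem_range]
  by_cases htj : t < (j : Int)
  · rw [if_pos htj, hz j htj h2, List.getD_eq_getElem _ _ h2]
    ring
  · rw [if_neg htj, List.getD_eq_getElem _ _ h2]

theorem mixRow_set (x : Int) (r : List Int) (i : Int) (h1 : 1 ≤ i) (h2 : i < r.length) :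
    PySem.List.pySetD (mixRow x r i) i
      (PySem.List.pyGetD (mixRow x r i) i 0
        + (x - i + 1) * PySem.List.pyGetD (mixRow x r i) (i-1) 0)
    = mixRow x r (i-1) := by
  obtain ⟨i', rfl⟩ : ∃ i' : Nat, i = (i' : Int) := ⟨i.toNat, by omega⟩
  have hi' : i' < r.length := by exact_mod_cast h2
  have hgood : ∀ (p : Nat), p < r.length → (p : Int) ≤ (i' : Int) →
      (mixRow x r (i' : Int)).getD p 0 = r.getD p 0 := by
    intro p hp hpi
    rw [List.getD_eq_getElem _ _ (by simp [mixRow]; omega)]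
    simp only [mixRow, List.getElem_map, List.getElem_range]
    rw [if_neg (by omega)]
  have hA : PySem.List.pyGetD (mixRow x r (i' : Int)) (i' : Int) 0 = r.getD i' 0 := by
    rw [PySem.List.pyGetD_natCast]
    exact hgood i' hi' le_rfl
  have hB : PySem.List.pyGetD (mixRow x r (i' : Int)) ((i' : Int) - 1) 0 = r.getD (i'-1) 0 := by
    rw [show ((i' : Int) - 1) = ((i' - 1 : Nat) : Int) by omega, PySem.List.pyGetD_natCast]
    exact hgood (i'-1) (by omega) (by omega)
  rw [hA, hB, PySem.List.pySetD_natCast]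
  apply List.ext_getElem
  · simp [mixRow]
  intro p hp1 hp2
  simp only [List.length_set, mixRow, List.length_map, List.length_range] at hp1
  rw [List.getElem_set]
  by_cases hip : i' = p
  · subst hip
    rw [if_pos rfl]
    simp only [mixRow, List.getElem_map, List.getElem_range]
    rw [if_pos (by omega)]
  · rw [if_neg hip]
    simp only [mixRow, List.getElem_map, List.getElem_range]
    have : ((i' : Int) < (p : Int)) ↔ ((i' : Int) - 1 < (p : Int)) := by
      constructor <;> intro h
      · omega
      · have : i' ≠ p := hip
        omega
    simp only [this]

-- B's inner loop (bounded by min k (i+1)) equals the full rank update mixRow _ _ 0,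
-- given that every row entry above position i is 0
theorem inner_eq (k x i : Int) (hk : 0 ≤ k) (hi : 0 ≤ i) (r : List Int)
    (hr : r.length = k.toNat + 1) (hz : ∀ q : Nat, i < (q : Int) → r.getD q 0 = 0) :
    (PySem.List.pyRange (min k (i + 1)) 0 (-1)).foldl
      (fun dp j => PySem.List.pySetD dp j
        (PySem.List.pyGetD dp j 0 + (x - j + 1) * PySem.List.pyGetD dp (j-1) 0)) r
    = mixRow x r 0 := by
  have hak : min k (i + 1) ≤ k := min_le_left _ _
  have hai : min k (i + 1) ≤ i + 1 := min_le_right _ _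
  have ha : 0 ≤ min k (i + 1) := le_min hk (by omega)
  have h0 : r = mixRow x r (min k (i + 1)) := by
    refine (mixRow_eq_self x r _ ?_).symm
    intro j hj hjl
    by_cases hcase : k ≤ i + 1
    · -- min = k: no j with j ≤ K and k < j
      exact absurd hj (by rw [min_eq_left hcase]; omega)
    · -- min = i+1: j - 1 > i, use hz
      rw [min_eq_right (by omega : i + 1 ≤ k)] at hj
      exact hz (j - 1) (by omega)
  conv_lhs => rw [h0]
  exact foldl_countdown0 _ (fun t => mixRow x r t) (min k (i + 1)) ha
    (fun i0 h1 h2 => mixRow_set x r i0 h1 (by omega))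

-- zero-above-i is preserved by the rank update
theorem mixRow_zeros (x i : Int) (hi : 0 ≤ i) (r : List Int)
    (hz : ∀ q : Nat, i < (q : Int) → r.getD q 0 = 0) :
    ∀ q : Nat, i + 1 < (q : Int) → (mixRow x r 0).getD q 0 = 0 := by
  intro q hq
  by_cases hql : q < r.length
  · rw [List.getD_eq_getElem _ _ (by simpa [mixRow] using hql)]
    simp only [mixRow, List.getElem_map, List.getElem_range]
    rw [if_pos (by omega), hz q (by omega), hz (q - 1) (by omega)]
    ring
  · rw [List.getD_eq_default _ _ (by simp [mixRow]; omega)]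

-- the bilinear invariant: Σ_j r[j] · gDP k s (K - j)
def rowSum (k : Int) (s r : List Int) : Int :=
  ∑ j ∈ Finset.range (k.toNat + 1), r.getD j 0 * gDP k s (k.toNat - j)

theorem rowSum_step (k x : Int) (hk : 0 ≤ k) (s r : List Int) (hr : r.length = k.toNat + 1) :
    rowSum k s (mixRow x r 0) = rowSum k (x :: s) r := by
  unfold rowSum
  have hget : ∀ j ∈ Finset.range (k.toNat + 1),
      (mixRow x r 0).getD j 0 * gDP k s (k.toNat - j)
      = (if 0 < j then (x - (j : Int) + 1) * r.getD (j-1) 0 * gDP k s (k.toNat - j) else 0)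
        + r.getD j 0 * gDP k s (k.toNat - j) := by
    intro j hj
    rw [Finset.mem_range] at hj
    rw [List.getD_eq_getElem _ _ (by simp [mixRow]; omega)]
    simp only [mixRow, List.getElem_map, List.getElem_range]
    by_cases h0j : 0 < j
    · rw [if_pos (by exact_mod_cast h0j), if_pos h0j,
          List.getD_eq_getElem _ _ (by omega), List.getD_eq_getElem _ _ (by omega)]
      ring
    · have : j = 0 := by omega
      subst this
      norm_num
  rw [Finset.sum_congr rfl hget, Finset.sum_add_distrib]
  have hsplit : ∀ j ∈ Finset.range (k.toNat + 1),
      r.getD j 0 * gDP k (x :: s) (k.toNat - j)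
      = (if j < k.toNat then r.getD j 0 * ((x - (j : Int)) * gDP k s (k.toNat - j - 1)) else 0)
        + r.getD j 0 * gDP k s (k.toNat - j) := by
    intro j hj
    rw [Finset.mem_range] at hj
    by_cases hjk : j < k.toNat
    · rw [if_pos hjk]
      obtain ⟨m, hm⟩ : ∃ m, k.toNat - j = m + 1 := ⟨k.toNat - j - 1, by omega⟩
      rw [hm]
      simp only [gDP, Nat.add_sub_cancel]
      rw [show (x - k + ((m : Int) + 1)) = x - (j : Int) by omega]
      ring
    · have : j = k.toNat := by omega
      subst this
      simp [gDP_zero]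
  rw [Finset.sum_congr rfl hsplit, Finset.sum_add_distrib]
  congr 1
  -- the cross terms agree after shifting the index by one
  rw [Finset.sum_range_succ' (fun j => if 0 < j then (x - (j : Int) + 1) * r.getD (j-1) 0 * gDP k s (k.toNat - j) else 0) k.toNat,
      Finset.sum_range_succ (fun j => if j < k.toNat then r.getD j 0 * ((x - (j : Int)) * gDP k s (k.toNat - j - 1)) else 0) k.toNat]
  rw [if_neg (lt_irrefl 0), if_neg (lt_irrefl k.toNat), add_zero, add_zero]
  apply Finset.sum_congr rfl
  intro j hj
  rw [Finset.mem_range] at hj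
  rw [if_pos (Nat.succ_pos j), if_pos hj,
      show j + 1 - 1 = j from rfl, show k.toNat - (j + 1) = k.toNat - j - 1 by omega]
  push_cast
  ring

theorem fold_inv (k : Int) (hk : 0 ≤ k) :
    ∀ (s : List Int) (p : Nat) (r : List Int), r.length = k.toNat + 1 →
    (∀ q : Nat, (p : Int) < (q : Int) → r.getD q 0 = 0) →
    ((PySem.List.enumerate s (p : Int)).foldl (fun dp ix =>
        (PySem.List.pyRange (min k (ix.1 + 1)) 0 (-1)).foldl
          (fun dp j => PySem.List.pySetD dp j
            (PySem.List.pyGetD dp j 0 + (ix.2 - j + 1) * PySem.List.pyGetD dp (j-1) 0)) dp) r).length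
      = k.toNat + 1
    ∧ rowSum k []
        ((PySem.List.enumerate s (p : Int)).foldl (fun dp ix =>
          (PySem.List.pyRange (min k (ix.1 + 1)) 0 (-1)).foldl
            (fun dp j => PySem.List.pySetD dp j
              (PySem.List.pyGetD dp j 0 + (ix.2 - j + 1) * PySem.List.pyGetD dp (j-1) 0)) dp) r)
      = rowSum k s r := by
  intro s
  induction s with
  | nil =>
    intro p r hr _
    rw [PySem.List.enumerate_nil]
    exact ⟨hr, rfl⟩
  | cons x xs ih =>
    intro p r hr hz
    rw [PySem.List.enumerate_cons]
    simp only [List.foldl_cons]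
    rw [inner_eq k x (p : Int) hk (by omega) r hr hz]
    have hz' : ∀ q : Nat, ((p + 1 : Nat) : Int) < (q : Int) → (mixRow x r 0).getD q 0 = 0 := by
      intro q hq
      exact mixRow_zeros x (p : Int) (by omega) r hz q (by omega)
    rw [show ((p : Int) + 1) = ((p + 1 : Nat) : Int) by push_cast; ring]
    obtain ⟨hlen, hsum⟩ := ih (p + 1) (mixRow x r 0) (by rw [length_mixRow, hr]) hz'
    exact ⟨hlen, by rw [hsum, rowSum_step k x hk _ r hr]⟩

theorem alt_eq (v : List Int) (k : Int) (hk : 0 ≤ k) : calc_py_alt v k = gDP k v k.toNat := by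
  unfold calc_py_alt
  have hr0 : ((1 : Int) :: List.replicate k.toNat 0).length = k.toNat + 1 := by simp
  have hz0 : ∀ q : Nat, ((0 : Nat) : Int) < (q : Int) →
      ((1 : Int) :: List.replicate k.toNat 0).getD q 0 = 0 := by
    intro q hq
    obtain ⟨q', rfl⟩ : ∃ q', q = q' + 1 := ⟨q - 1, by omega⟩
    simp [List.getD]
  obtain ⟨hlen, hsum⟩ := fold_inv k hk v 0 ((1 : Int) :: List.replicate k.toNat 0) hr0 hz0
  rw [Nat.cast_zero] at hlen hsum
  set final := (PySem.List.enumerate v (0 : Int)).foldl (fun dp ix =>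
      (PySem.List.pyRange (min k (ix.1 + 1)) 0 (-1)).foldl
        (fun dp j => PySem.List.pySetD dp j
          (PySem.List.pyGetD dp j 0 + (ix.2 - j + 1) * PySem.List.pyGetD dp (j-1) 0)) dp)
    ((1 : Int) :: List.replicate k.toNat 0) with hfinal
  have hidx : PySem.List.pyGetD final k 0 = final.getD k.toNat 0 := by
    rw [show k = ((k.toNat : Nat) : Int) by omega, PySem.List.pyGetD_natCast]
    rw [Int.toNat_natCast]
  rw [hidx]
  -- rowSum over the empty suffix picks out index K
  have hL : rowSum k [] final = final.getD k.toNat 0 := by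
    unfold rowSum
    rw [Finset.sum_range_succ]
    have hz : ∀ j ∈ Finset.range k.toNat, final.getD j 0 * gDP k [] (k.toNat - j) = 0 := by
      intro j hj
      rw [Finset.mem_range] at hj
      have : k.toNat - j = (k.toNat - j - 1) + 1 := by omega
      rw [this]
      simp [gDP]
    rw [Finset.sum_congr rfl hz]
    simp [gDP_zero]
  -- rowSum of the initial row over the whole list is gDP
  have hR : rowSum k v ((1 : Int) :: List.replicate k.toNat 0) = gDP k v k.toNat := by
    unfold rowSum
    rw [Finset.sum_range_succ' (fun j => ((1 : Int) :: List.replicate k.toNat 0).getD j 0 * gDP k v (k.toNat - j)) k.toNat]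
    have hz : ∀ j ∈ Finset.range k.toNat,
        ((1 : Int) :: List.replicate k.toNat 0).getD (j+1) 0 * gDP k v (k.toNat - (j+1)) = 0 := by
      intro j hj
      rw [Finset.mem_range] at hj
      simp [List.getD]
    rw [Finset.sum_congr rfl hz]
    simp [List.getD]
  rw [← hL, hsum, hR]

-- ===== VERDICT (by name: the statement is the Claim_ definition above) =====
theorem calc_py_spec : Claim_equal_calc_py := by
  intro v k hdom hpre
  unfold Spec_calc_py
  rcases hpre with h0 | ⟨hk, hv⟩
  · subst h0
    rw [alt_eq v 0 le_rfl]
    unfold calc_py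
    simp [gDP_zero]
  · rw [a_eq v k hk hv, alt_eq v k (by omega)]
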